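-- pv_equiv track=rewrite | github.com/pypi-data/pypi-mirror-397 | packages/chloros-sdk/chloros_sdk-1.0.0.tar.gz/chloros_sdk-1.0.0/remove_debug_errors.py | remove_debug_errors
-- ===== SOURCE A (Python) =====
-- def remove_debug_errors(content):
--     """Remove console.error/console.log lines with [DEBUG] tags"""
--     lines = content.split('\n')
--     result = []
--     removed = 0
--
--     i = 0
--     while i < len(lines):
--         line = lines[i]
--
--         # Check for console.error or console.log with [DEBUG]
--         if ('[DEBUG]' in line) and ('console.error' in line or 'console.log' in line):
--             # Skip this line and any continuation
--             removed += 1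
--             # If multi-line, skip until closing
--             if not (');' in line or line.strip().endswith(');')):
--                 paren_count = line.count('(') - line.count(')')
--                 i += 1
--                 while i < len(lines) and paren_count != 0:
--                     paren_count += lines[i].count('(') - lines[i].count(')')
--                     i += 1
--                 continue
--             i += 1
--             continue
--
--         result.append(line)
--         i += 1
--
--     return '\n'.join(result), removed
-- ===== SOURCE B (Python) =====
-- def remove_debug_errors(content):
--     """Remove console.error/console.log lines with [DEBUG] tags"""
--     result = []
--     removed = 0
--     paren_count = None  # None = normal; int = inside an unclosed multi-line debug call
--     for line in content.split('\n'):
--         if paren_count is not None: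
--             paren_count += line.count('(') - line.count(')')
--             if paren_count == 0:
--                 paren_count = None
--         elif '[DEBUG]' in line and ('console.error' in line or 'console.log' in line):
--             removed += 1
--             if not (');' in line or line.strip().endswith(');')):
--                 net = line.count('(') - line.count(')')
--                 if net != 0:
--                     paren_count = net
--         else:
--             result.append(line)
--     return '\n'.join(result), removed
-- ===== Notes on version B (the rewrite author's own statement) =====
-- stated objective: simpler
-- what changed: A's index-driven while loop with a nested inner while for multi-line calls is replaced by a single for-loop over the lines carrying one persistent skip-state variable (None = copy mode, int = open-paren balance of an unclosed debug call).
import Mathlib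
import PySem

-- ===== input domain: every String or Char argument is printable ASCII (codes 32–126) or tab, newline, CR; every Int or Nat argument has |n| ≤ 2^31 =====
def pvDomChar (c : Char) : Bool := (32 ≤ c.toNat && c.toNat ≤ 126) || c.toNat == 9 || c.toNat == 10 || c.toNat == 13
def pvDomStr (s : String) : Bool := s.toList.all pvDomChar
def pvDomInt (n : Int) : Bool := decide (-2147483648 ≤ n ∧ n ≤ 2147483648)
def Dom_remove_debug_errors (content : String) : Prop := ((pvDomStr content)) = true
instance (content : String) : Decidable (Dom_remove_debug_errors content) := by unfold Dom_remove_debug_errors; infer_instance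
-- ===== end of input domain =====

-- B replaces A's index-driven while loop (with a nested inner while for multi-line calls)
-- by a single pass over the lines carrying an Option Int skip-state; objective: simpler.

-- shared helpers (the same sub-expressions occur verbatim in both Pythons)
def pvNet (line : String) : Int :=
  (PySem.Str.count line "(" : Int) - (PySem.Str.count line ")" : Int)

def pvIsDebug (line : String) : Bool :=
  PySem.Str.isIn "[DEBUG]" line &&
    (PySem.Str.isIn "console.error" line || PySem.Str.isIn "console.log" line)

def pvIsTerm (line : String) : Bool :=
  PySem.Str.isIn ");" line || PySem.Str.endswith (PySem.Str.strip line) ");"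

-- ===== PORT A =====
-- inner `while i < len(lines) and paren_count != 0` of A (fuel = enough iterations;
-- every iteration advances i, so fuel = lines.length always suffices)
def pvASkip (lines : List String) (fuel : Nat) (pc : Int) (i : Nat) : Nat :=
  match fuel with
  | 0 => i
  | fuel + 1 =>
    if i < lines.length ∧ pc ≠ 0 then
      pvASkip lines fuel (pc + pvNet (lines.getD i "")) (i + 1)
    else i

-- outer `while i < len(lines)` of A (same fuel convention)
def pvALoop (lines : List String) (fuel : Nat) (i : Nat) (result : List String)
    (removed : Int) : String × Int :=
  match fuel with
  | 0 => (PySem.Str.join "\n" result, removed)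
  | fuel + 1 =>
    if i < lines.length then
      let line := lines.getD i ""
      if pvIsDebug line then
        if !(pvIsTerm line) then
          pvALoop lines fuel (pvASkip lines lines.length (pvNet line) (i + 1)) result
            (removed + 1)
        else
          pvALoop lines fuel (i + 1) result (removed + 1)
      else
        pvALoop lines fuel (i + 1) (result ++ [line]) removed
    else (PySem.Str.join "\n" result, removed)

def remove_debug_errors (content : String) : String × Int :=
  let lines := (PySem.Str.split? content "\n").getD []
  pvALoop lines lines.length 0 [] 0

-- ===== PORT B =====
-- one step of B's single for-loop; state = (result, removed, paren_count : Option Int)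
def pvBStep (st : List String × Int × Option Int) (line : String) :
    List String × Int × Option Int :=
  match st with
  | (result, removed, some pc) =>
    let pc := pc + pvNet line
    (result, removed, if pc = 0 then none else some pc)
  | (result, removed, none) =>
    if pvIsDebug line then
      if !(pvIsTerm line) then
        let net := pvNet line
        (result, removed + 1, if net ≠ 0 then some net else none)
      else (result, removed + 1, none)
    else (result ++ [line], removed, none)

def remove_debug_errors_alt (content : String) : String × Int :=
  let st : List String × Int × Option Int :=
    ((PySem.Str.split? content "\n").getD []).foldl pvBStep ([], 0, none)
  (PySem.Str.join "\n" st.1, st.2.1)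

-- ===== PRECONDITION & SPEC =====
def Spec_remove_debug_errors (content : String) (out : String × Int) : Prop :=
  out = remove_debug_errors_alt content
instance (content : String) (out : String × Int) : Decidable (Spec_remove_debug_errors content out) := by
  unfold Spec_remove_debug_errors; infer_instance

-- ===== CLAIM (what is proved, stated in full; the proofs are below) =====
def Claim_equal_remove_debug_errors : Prop :=
  ∀ (content : String), Dom_remove_debug_errors content →
    Spec_remove_debug_errors content (remove_debug_errors content)

-- ===== LEMMAS AND PROOFS =====
theorem pvASkip_zero (lines : List String) (f : Nat) (j : Nat) :
    pvASkip lines f 0 j = j := by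
  cases f <;> simp [pvASkip]

theorem pvMain (n : Nat) (lines : List String) (i : Nat) (hn : lines.length - i ≤ n) :
    (∀ fuel res rem, lines.length - i ≤ fuel → pvALoop lines fuel i res rem =
      (PySem.Str.join "\n" ((lines.drop i).foldl pvBStep (res, rem, none)).1,
        ((lines.drop i).foldl pvBStep (res, rem, none)).2.1))
    ∧ (∀ fuelS fuelA pc res rem, pc ≠ 0 → lines.length - i ≤ fuelS →
        lines.length - i ≤ fuelA →
        pvALoop lines fuelA (pvASkip lines fuelS pc i) res rem =
      (PySem.Str.join "\n" ((lines.drop i).foldl pvBStep (res, rem, some pc)).1,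
        ((lines.drop i).foldl pvBStep (res, rem, some pc)).2.1)) := by
  induction n generalizing i with
  | zero =>
    have hlen : lines.length ≤ i := by omega
    have hdrop : lines.drop i = [] := List.drop_eq_nil_of_le hlen
    constructor
    · intro fuel res rem _
      cases fuel with
      | zero => rw [pvALoop, hdrop]; simp
      | succ f => rw [pvALoop, if_neg (by omega), hdrop]; simp
    · intro fuelS fuelA pc res rem hpc _ _
      have hskip : pvASkip lines fuelS pc i = i := by
        cases fuelS with
        | zero => rw [pvASkip]
        | succ f => rw [pvASkip, if_neg (by omega)]
      rw [hskip, hdrop]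
      cases fuelA with
      | zero => rw [pvALoop]; simp
      | succ f => rw [pvALoop, if_neg (by omega)]; simp
  | succ n ih =>
    by_cases hi : i < lines.length
    · have hdrop : lines.drop i = lines[i] :: lines.drop (i + 1) :=
        List.drop_eq_getElem_cons hi
      have hgetD : lines.getD i "" = lines[i] := by
        simp [List.getD_eq_getElem?_getD, List.getElem?_eq_getElem hi]
      have hn' : lines.length - (i + 1) ≤ n := by omega
      constructor
      · intro fuel res rem hfuel
        obtain ⟨f, rfl⟩ : ∃ f, fuel = f + 1 := ⟨fuel - 1, by omega⟩
        rw [pvALoop, if_pos hi]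
        simp only [hgetD, hdrop, List.foldl_cons]
        by_cases hd : pvIsDebug lines[i]
        · by_cases ht : pvIsTerm lines[i]
          · have hstep : pvBStep (res, rem, none) lines[i] = (res, rem + 1, none) := by
              simp [pvBStep, hd, ht]
            rw [hstep]
            simp only [hd, ht, Bool.not_true, if_true, if_false, Bool.false_eq_true]
            exact (ih (i + 1) hn').1 f res (rem + 1) (by omega)
          · by_cases hpc : pvNet lines[i] = 0
            · have hstep : pvBStep (res, rem, none) lines[i] = (res, rem + 1, none) := by
                simp [pvBStep, hd, ht, hpc]
              rw [hstep]
              simp only [hd, ht, Bool.not_false, if_true]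
              rw [hpc, pvASkip_zero]
              exact (ih (i + 1) hn').1 f res (rem + 1) (by omega)
            · have hstep : pvBStep (res, rem, none) lines[i] =
                  (res, rem + 1, some (pvNet lines[i])) := by
                simp [pvBStep, hd, ht, hpc]
              rw [hstep]
              simp only [hd, ht, Bool.not_false, if_true]
              exact (ih (i + 1) hn').2 lines.length f (pvNet lines[i]) res (rem + 1) hpc
                (by omega) (by omega)
        · have hstep : pvBStep (res, rem, none) lines[i] = (res ++ [lines[i]], rem, none) := by
            simp [pvBStep, hd]
          rw [hstep]
          simp only [hd, if_false, Bool.false_eq_true]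
          exact (ih (i + 1) hn').1 f (res ++ [lines[i]]) rem (by omega)
      · intro fuelS fuelA pc res rem hpc hfS hfA
        obtain ⟨fS, rfl⟩ : ∃ f, fuelS = f + 1 := ⟨fuelS - 1, by omega⟩
        rw [pvASkip, if_pos ⟨hi, hpc⟩]
        simp only [hgetD, hdrop, List.foldl_cons]
        by_cases h0 : pc + pvNet lines[i] = 0
        · have hstep : pvBStep (res, rem, some pc) lines[i] = (res, rem, none) := by
            simp [pvBStep, h0]
          rw [hstep, h0, pvASkip_zero]
          exact (ih (i + 1) hn').1 fuelA res rem (by omega)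
        · have hstep : pvBStep (res, rem, some pc) lines[i] =
              (res, rem, some (pc + pvNet lines[i])) := by
            simp [pvBStep, h0]
          rw [hstep]
          exact (ih (i + 1) hn').2 fS fuelA (pc + pvNet lines[i]) res rem h0 (by omega)
            (by omega)
    · have hlen : lines.length ≤ i := by omega
      have hdrop : lines.drop i = [] := List.drop_eq_nil_of_le hlen
      constructor
      · intro fuel res rem _
        cases fuel with
        | zero => rw [pvALoop, hdrop]; simp
        | succ f => rw [pvALoop, if_neg (by omega), hdrop]; simp
      · intro fuelS fuelA pc res rem hpc _ _
        have hskip : pvASkip lines fuelS pc i = i := by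
          cases fuelS with
          | zero => rw [pvASkip]
          | succ f => rw [pvASkip, if_neg (by omega)]
        rw [hskip, hdrop]
        cases fuelA with
        | zero => rw [pvALoop]; simp
        | succ f => rw [pvALoop, if_neg (by omega)]; simp

-- ===== VERDICT (by name: the statement is the Claim_ definition above) =====
theorem remove_debug_errors_spec : Claim_equal_remove_debug_errors := by
  intro content _
  unfold Spec_remove_debug_errors remove_debug_errors remove_debug_errors_alt
  exact (pvMain ((PySem.Str.split? content "\n").getD []).length
    ((PySem.Str.split? content "\n").getD []) 0 (by omega)).1
    ((PySem.Str.split? content "\n").getD []).length [] 0 (by omega)
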